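-- pv_equiv track=rewrite | github.com/pixel7777/SysMLcheap | tools/generate_diagrams.py | generate_package_diagram
-- ===== SOURCE A (Python) =====
-- def generate_package_diagram(model, index):
--     lines = [
--         "@startuml Package Structure",
--         "",
--     ]
--
--     # Build tree
--     root_pkgs = [p for p in model.get("packages", []) if not p.get("ownerRef")]
--     child_map = {}
--     for p in model.get("packages", []):
--         owner = p.get("ownerRef")
--         if owner:
--             child_map.setdefault(owner, []).append(p)
--
--     def render_package(pkg, indent=0):
--         prefix = "  " * indent
--         children = child_map.get(pkg["id"], [])
--         if children:
--             lines.append(f'{prefix}package "{pkg["name"]}" as {pkg["id"]} {{')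
--             for child in children:
--                 render_package(child, indent + 1)
--             lines.append(f"{prefix}}}")
--         else:
--             lines.append(f'{prefix}package "{pkg["name"]}" as {pkg["id"]}')
--
--     for pkg in root_pkgs:
--         render_package(pkg)
--
--     lines.append("")
--     lines.append("@enduml")
--     return "\n".join(lines)
-- ===== SOURCE B (Python) =====
-- def generate_package_diagram(model, index):
--     packages = model.get("packages", [])
--
--     child_map = {}
--     for p in packages:
--         owner = p.get("ownerRef")
--         if owner:
--             child_map.setdefault(owner, []).append(p)
--
--     lines = [
--         "@startuml Package Structure",
--         "",
--     ]
--
--     # Explicit-stack DFS: closing braces are emitted by close-sentinels,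
--     # children are pushed in reverse to keep left-to-right order.
--     roots = [p for p in packages if not p.get("ownerRef")]
--     stack = [("open", p, 0) for p in reversed(roots)]
--     while stack:
--         item = stack.pop()
--         if item[0] == "close":
--             lines.append(item[1] + "}")
--         else:
--             _, pkg, indent = item
--             prefix = "  " * indent
--             children = child_map.get(pkg["id"], [])
--             if children:
--                 lines.append(f'{prefix}package "{pkg["name"]}" as {pkg["id"]} {{')
--                 stack.append(("close", prefix))
--                 for child in reversed(children):
--                     stack.append(("open", child, indent + 1))
--             else:
--                 lines.append(f'{prefix}package "{pkg["name"]}" as {pkg["id"]}')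
--
--     lines.append("")
--     lines.append("@enduml")
--     return "\n".join(lines)
-- ===== Notes on version B (the rewrite author's own statement) =====
-- stated objective: alternative
-- what changed: The recursive render_package helper (call stack, appending to a closed-over list) is replaced by an iterative explicit-stack DFS with close-sentinels: children are pushed in reverse and a ('close', prefix) sentinel defers the closing brace until the whole subtree is emitted.
import Mathlib
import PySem

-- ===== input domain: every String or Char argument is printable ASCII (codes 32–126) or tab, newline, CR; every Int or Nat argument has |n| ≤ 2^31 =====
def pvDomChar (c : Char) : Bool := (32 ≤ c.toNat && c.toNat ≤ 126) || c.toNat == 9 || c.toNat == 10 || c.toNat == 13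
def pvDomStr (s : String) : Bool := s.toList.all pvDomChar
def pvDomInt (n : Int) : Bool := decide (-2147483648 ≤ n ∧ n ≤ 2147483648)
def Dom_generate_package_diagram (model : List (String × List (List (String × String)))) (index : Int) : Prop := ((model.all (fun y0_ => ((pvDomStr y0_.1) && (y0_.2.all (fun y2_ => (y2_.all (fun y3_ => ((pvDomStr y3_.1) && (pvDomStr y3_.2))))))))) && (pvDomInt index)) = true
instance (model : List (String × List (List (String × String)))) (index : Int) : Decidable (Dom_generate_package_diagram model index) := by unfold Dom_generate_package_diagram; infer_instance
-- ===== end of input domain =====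

-- B replaces A's recursive render_package with an explicit-stack DFS using close-sentinels
-- (same output, alternative decomposition); A's in-place list appends are pure accumulators here.

-- ===== PORT A =====
-- shared small helpers (identical code in Source A and Source B): dict lookups, "  "*indent, the two
-- f-string line shapes, child_map building and the root filter.
def pvGetS (p : List (String × String)) (k : String) : String :=
  ((PySem.Dict.mk p).get? k).getD ""   -- p.get(k): "" stands for a missing/empty value (truthiness test);
                                       -- for p["id"] / p["name"] this is exact under Pre_ (keys present)

def pvPrefix (indent : Nat) : String :=
  String.join (List.replicate indent "  ")   -- "  " * indent (exact: plain repetition)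

def pvLeafLine (pfx : String) (p : List (String × String)) : String :=
  pfx ++ "package \"" ++ pvGetS p "name" ++ "\" as " ++ pvGetS p "id"

def pvOpenLine (pfx : String) (p : List (String × String)) : String :=
  pvLeafLine pfx p ++ " {"

def pvChildMap (packages : List (List (String × String))) :
    PySem.Dict String (List (List (String × String))) :=
  packages.foldl
    (fun d p =>
      let owner := pvGetS p "ownerRef"
      if owner ≠ "" then d.insert owner (d.getD owner [] ++ [p]) else d)
    PySem.Dict.empty   -- child_map.setdefault(owner, []).append(p)

def pvRoots (packages : List (List (String × String))) : List (List (String × String)) :=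
  packages.filter (fun p => pvGetS p "ownerRef" == "")   -- not p.get("ownerRef")

-- render_package(pkg, indent), appending to the accumulator `acc` (Python's closed-over `lines`).
-- The fuel argument is a termination guard only: under Pre_ (distinct ids) the recursion depth is
-- at most the number of packages, so fuel = packages.length + 1 is never exhausted.
def pvRenderA (cm : PySem.Dict String (List (List (String × String)))) :
    Nat → List String → List (String × String) → Nat → List String
  | 0, acc, _, _ => acc
  | Nat.succ f, acc, pkg, indent =>
    let pfx := pvPrefix indent
    let children := cm.getD (pvGetS pkg "id") []
    if children ≠ [] then
      (children.foldl (fun a c => pvRenderA cm f a c (indent + 1)) (acc ++ [pvOpenLine pfx pkg]))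
        ++ [pfx ++ "}"]
    else acc ++ [pvLeafLine pfx pkg]
  termination_by f _ _ _ => f

def generate_package_diagram (model : List (String × List (List (String × String)))) (index : Int) : String :=
  let packages := (PySem.Dict.mk model).getD "packages" []
  let root_pkgs := pvRoots packages
  let cm := pvChildMap packages
  let lines : List String := ["@startuml Package Structure", ""]
  let lines := root_pkgs.foldl (fun acc p => pvRenderA cm (packages.length + 1) acc p 0) lines
  PySem.Str.join "\n" (lines ++ ["", "@enduml"])

-- ===== PORT B =====
-- stack items: ("open", pkg, indent) carrying the same termination-guard fuel, or ("close", prefix).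
inductive PvItem : Type
  | openP : List (String × String) → Nat → Nat → PvItem   -- pkg, indent, fuel (guard only)
  | closeP : String → PvItem
  deriving Repr, DecidableEq

-- termination measure for the while-loop (proof bookkeeping only, not part of Source B's computation)
def pvCost (cm : PySem.Dict String (List (List (String × String)))) :
    Nat → List (String × String) → Nat
  | 0, _ => 1
  | Nat.succ f, pkg =>
    if cm.getD (pvGetS pkg "id") [] ≠ [] then
      2 + ((cm.getD (pvGetS pkg "id") []).map (fun c => pvCost cm f c)).sum
    else 1
  termination_by f _ => f

def pvWeight (cm : PySem.Dict String (List (List (String × String)))) : PvItem → Nat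
  | .closeP _ => 1
  | .openP pkg _ f => pvCost cm f pkg

-- the while-loop of Source B; the Lean list's head is the Python list's end (the top of the stack),
-- so Python's "push reversed(children)" is "prepend children in order" here.
def pvLoopB (cm : PySem.Dict String (List (List (String × String)))) :
    List PvItem → List String → List String
  | [], acc => acc
  | .closeP pfx :: s, acc => pvLoopB cm s (acc ++ [pfx ++ "}"])
  | .openP _ _ 0 :: s, acc => pvLoopB cm s acc   -- fuel guard exhausted (unreachable under Pre_)
  | .openP pkg indent (Nat.succ f) :: s, acc =>
    let pfx := pvPrefix indent
    let children := cm.getD (pvGetS pkg "id") []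
    if children ≠ [] then
      pvLoopB cm (children.map (fun c => PvItem.openP c (indent + 1) f) ++ PvItem.closeP pfx :: s)
        (acc ++ [pvOpenLine pfx pkg])
    else pvLoopB cm s (acc ++ [pvLeafLine pfx pkg])
  termination_by s _ => (s.map (pvWeight cm)).sum
  decreasing_by
  all_goals simp only [List.map_append, List.map_cons, List.sum_append, List.sum_cons,
      List.map_map, Function.comp_def, pvWeight, pvCost]
  all_goals first
    | omega
    | (split <;> omega)

def generate_package_diagram_alt (model : List (String × List (List (String × String)))) (index : Int) : String :=
  let packages := (PySem.Dict.mk model).getD "packages" []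
  let cm := pvChildMap packages
  let lines : List String := ["@startuml Package Structure", ""]
  let roots := pvRoots packages
  let stack := roots.map (fun p => PvItem.openP p 0 (packages.length + 1))
  let lines := pvLoopB cm stack lines
  PySem.Str.join "\n" (lines ++ ["", "@enduml"])

-- ===== PRECONDITION & SPEC =====
-- Pre_ excludes models where a listed package lacks an "id" or "name" key (A raises KeyError if it
-- gets rendered; unrendered ones are excluded with it for a closed form) and models with duplicate
-- package ids (there A's recursion can loop forever — RecursionError on cyclic ownership — and
-- otherwise re-renders subtrees; B agrees with A on the terminating excluded cases).
def Pre_generate_package_diagram (model : List (String × List (List (String × String)))) (index : Int) : Prop :=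
  (∀ p ∈ (PySem.Dict.mk model).getD "packages" ([] : List (List (String × String))),
      ((PySem.Dict.mk p).get? "id").isSome = true ∧ ((PySem.Dict.mk p).get? "name").isSome = true)
  ∧ (((PySem.Dict.mk model).getD "packages" ([] : List (List (String × String)))).map
      (fun p => ((PySem.Dict.mk p).get? "id").getD "")).Nodup
instance (model : List (String × List (List (String × String)))) (index : Int) : Decidable (Pre_generate_package_diagram model index) := by unfold Pre_generate_package_diagram; infer_instance

def pvWitness_generate_package_diagram : (List (String × List (List (String × String)))) × Int :=
  ([("packages", [[("id", "a"), ("name", "A")], [("ownerRef", "a"), ("id", "b"), ("name", "B")]])], 0)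

def Spec_generate_package_diagram (model : List (String × List (List (String × String)))) (index : Int) (out : String) : Prop := out = generate_package_diagram_alt model index
instance (model : List (String × List (List (String × String)))) (index : Int) (out : String) : Decidable (Spec_generate_package_diagram model index out) := by unfold Spec_generate_package_diagram; infer_instance

-- ===== CLAIM (what is proved, stated in full; the proofs are below) =====
def Claim_equal_generate_package_diagram : Prop := ∀ (model : List (String × List (List (String × String)))) (index : Int), Dom_generate_package_diagram model index → Pre_generate_package_diagram model index → Spec_generate_package_diagram model index (generate_package_diagram model index)

-- ===== LEMMAS AND PROOFS =====

theorem pvLoopB_nil (cm : PySem.Dict String (List (List (String × String)))) (acc : List String) :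
    pvLoopB cm [] acc = acc := by
  rw [pvLoopB]

theorem pvLoopB_close (cm : PySem.Dict String (List (List (String × String))))
    (pfx : String) (s : List PvItem) (acc : List String) :
    pvLoopB cm (.closeP pfx :: s) acc = pvLoopB cm s (acc ++ [pfx ++ "}"]) := by
  rw [pvLoopB]

-- popping an open item produces exactly what A's recursive render_package appends
theorem pvLoopB_open (cm : PySem.Dict String (List (List (String × String)))) :
    ∀ (f : Nat) (pkg : List (String × String)) (indent : Nat) (s : List PvItem) (acc : List String),
      pvLoopB cm (.openP pkg indent f :: s) acc = pvLoopB cm s (pvRenderA cm f acc pkg indent) := by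
  intro f
  induction f with
  | zero => intro pkg indent s acc; rw [pvLoopB, pvRenderA]
  | succ f ih =>
    intro pkg indent s acc
    have key : ∀ (i : Nat) (cs : List (List (String × String))) (s : List PvItem) (acc : List String),
        pvLoopB cm (cs.map (fun c => PvItem.openP c i f) ++ s) acc
          = pvLoopB cm s (cs.foldl (fun a c => pvRenderA cm f a c i) acc) := by
      intro i cs
      induction cs with
      | nil => intro s acc; simp
      | cons c cs ihc => intro s acc; simp only [List.map_cons, List.cons_append, ih,
          List.foldl_cons, ihc]
    rw [pvLoopB, pvRenderA]
    by_cases h : cm.getD (pvGetS pkg "id") [] = []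
    · simp [h]
    · simp only [h, ne_eq, not_false_eq_true, if_pos, key, pvLoopB_close]

-- the initial stack of roots unrolls to A's top-level fold over root_pkgs
theorem pvLoopB_roots (cm : PySem.Dict String (List (List (String × String)))) (F : Nat) :
    ∀ (roots : List (List (String × String))) (acc : List String),
      pvLoopB cm (roots.map (fun p => PvItem.openP p 0 F)) acc
        = roots.foldl (fun a p => pvRenderA cm F a p 0) acc := by
  intro roots
  induction roots with
  | nil => intro acc; simp [pvLoopB_nil]
  | cons r rs ih => intro acc; simp only [List.map_cons, pvLoopB_open, List.foldl_cons, ih]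

-- ===== VERDICT (by name: the statement is the Claim_ definition above) =====
theorem generate_package_diagram_spec : Claim_equal_generate_package_diagram := by
  intro model index _ _
  unfold Spec_generate_package_diagram generate_package_diagram generate_package_diagram_alt
  simp only [pvLoopB_roots]
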